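-- pv_equiv track=rewrite | github.com/ashtonkreiling/Worldforge | utils/name_to_filename.py | to_filename
-- ===== SOURCE A (Python) =====
-- import unicodedata
--
-- def to_filename(name: str) -> str:
--     # Normalize unicode (é → e, — → -)
--     name = unicodedata.normalize("NFKD", name)
--     name = name.encode("ascii", "ignore").decode("ascii")
--
--     result = []
--     prev_underscore = False
--
--     for ch in name.lower():
--         if ch.isalnum():
--             result.append(ch)
--             prev_underscore = False
--         else:
--             # Convert any non-alphanumeric run into a single underscore
--             if not prev_underscore:
--                 result.append("_")
--                 prev_underscore = True
--
--     # Join and trim leading/trailing underscores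
--     return "".join(result).strip("_")
-- ===== SOURCE B (Python) =====
-- import unicodedata
--
-- def to_filename(name: str) -> str:
--     # Same unicode-normalization prelude as before, then: blank out every
--     # non-alphanumeric character and let str.split() collapse the runs.
--     name = unicodedata.normalize("NFKD", name)
--     name = name.encode("ascii", "ignore").decode("ascii").lower()
--     return "_".join("".join(c if c.isalnum() else " " for c in name).split())
-- ===== Notes on version B (the rewrite author's own statement) =====
-- stated objective: idiomatic
-- what changed: Replaces the per-character state machine (prev_underscore flag, append loop, final strip of edge underscores) by blanking every non-alphanumeric character and letting str.split() and join collapse the runs and trim the ends.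
import Mathlib
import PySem

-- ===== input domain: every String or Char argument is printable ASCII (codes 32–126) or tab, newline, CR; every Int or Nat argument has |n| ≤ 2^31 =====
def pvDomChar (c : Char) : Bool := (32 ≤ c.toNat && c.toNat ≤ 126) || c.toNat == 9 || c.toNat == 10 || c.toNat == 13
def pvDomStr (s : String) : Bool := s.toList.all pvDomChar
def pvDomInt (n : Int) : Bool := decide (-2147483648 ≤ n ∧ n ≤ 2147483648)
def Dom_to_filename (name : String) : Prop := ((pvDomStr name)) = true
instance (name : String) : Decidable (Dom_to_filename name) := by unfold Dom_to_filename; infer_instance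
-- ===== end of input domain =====

-- B replaces A's per-character state machine (prev_underscore flag plus a final strip of edge underscores) by
-- blanking non-alphanumerics and using split()/join; objective: idiomatic, not faster.

-- ===== PORT A =====
-- NFKD normalization is the identity on the ASCII domain, and encode('ascii','ignore')
-- keeps exactly the code points < 128: ported as a filter (exact on Dom_to_filename).
def to_filename (name : String) : String :=
  let ascii : List Char := name.toList.filter (fun c => c.toNat < 128)
  let st : List Char × Bool :=
    (PySem.Chars.lower ascii).foldl
      (fun (st : List Char × Bool) ch =>
        if PySem.Chars.isalnum ch then (st.1 ++ [ch], false)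
        else if st.2 = false then (st.1 ++ ['_'], true) else st)
      ([], false)
  String.mk (PySem.Chars.stripChars st.1 ['_'])

-- ===== PORT B =====
def to_filename_alt (name : String) : String :=
  let ascii : List Char := name.toList.filter (fun c => c.toNat < 128)
  let lowered : List Char := PySem.Chars.lower ascii
  let blanked : List Char := lowered.map (fun c => if PySem.Chars.isalnum c then c else ' ')
  String.mk (PySem.Chars.join ['_'] (PySem.Chars.split₀ blanked))

-- ===== PRECONDITION & SPEC =====
def Spec_to_filename (name : String) (out : String) : Prop := out = to_filename_alt name
instance (name : String) (out : String) : Decidable (Spec_to_filename name out) := by unfold Spec_to_filename; infer_instance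

-- ===== CLAIM (what is proved, stated in full; the proofs are below) =====
def Claim_equal_to_filename : Prop := ∀ (name : String), Dom_to_filename name → Spec_to_filename name (to_filename name)

-- ===== LEMMAS AND PROOFS =====

-- A's loop, as a recursion on the characters (state: has an underscore just been emitted?)
def pvEmit : List Char → Bool → List Char
  | [], _ => []
  | c :: r, prev =>
    if PySem.Chars.isalnum c then c :: pvEmit r false
    else if prev then pvEmit r true else '_' :: pvEmit r true

theorem pvDropWhile_head (p : Char → Bool) (cs t' : List Char) (a : Char)
    (h : cs.dropWhile p = a :: t') : p a = false := by
  induction cs with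
  | nil => simp at h
  | cons x xs ih =>
    rw [List.dropWhile_cons] at h
    by_cases hx : p x = true
    · simp [hx] at h; exact ih h
    · simp [hx] at h; obtain ⟨rfl, _⟩ := h; simpa using hx

-- the maximal alphanumeric runs of cs, in order
def pvWords (cs : List Char) : List (List Char) :=
  let t := cs.dropWhile (fun c => !PySem.Chars.isalnum c)
  if h : t = [] then []
  else t.takeWhile PySem.Chars.isalnum :: pvWords (t.dropWhile PySem.Chars.isalnum)
termination_by cs.length
decreasing_by
  have h1 : t.length ≤ cs.length := List.length_dropWhile_le _ _
  obtain ⟨a, t', ht'⟩ := List.exists_cons_of_ne_nil h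
  have hp : (!PySem.Chars.isalnum a) = false := pvDropWhile_head _ cs t' a ht'
  show (List.dropWhile PySem.Chars.isalnum t).length < cs.length
  rw [ht'] at h1 ⊢
  simp only [Bool.not_eq_false'] at hp
  simp only [List.dropWhile_cons, hp, if_pos]
  have h2 : (t'.dropWhile PySem.Chars.isalnum).length ≤ t'.length := List.length_dropWhile_le _ _
  simp only [List.length_cons] at h1
  omega

-- the single leading underscore A's loop emits when cs starts with a non-alphanumeric
def pvLead (cs : List Char) : List Char :=
  match cs with
  | [] => []
  | c :: _ => if PySem.Chars.isalnum c then [] else ['_']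

-- the single trailing underscore A's loop emits after the last word
def pvTrail (cs : List Char) : List Char :=
  match cs.getLast? with
  | some c => if cs.any PySem.Chars.isalnum && !PySem.Chars.isalnum c then ['_'] else []
  | none => []

theorem pvAlnum_not_space (c : Char) (h : PySem.Chars.isalnum c = true) :
    PySem.Chars.isspace c = false := by
  simp only [PySem.Chars.isalnum, PySem.Chars.isalpha, PySem.Chars.isdigit,
    PySem.Chars.isupper, PySem.Chars.islower, Bool.or_eq_true, Bool.and_eq_true,
    decide_eq_true_eq, Char.le_def, UInt32.le_iff_toNat_le] at h
  simp only [PySem.Chars.isspace, Bool.or_eq_false_iff, Bool.and_eq_false_iff,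
    decide_eq_false_iff_not]
  have e1 : 'A'.val.toNat = 65 := by decide
  have e2 : 'Z'.val.toNat = 90 := by decide
  have e3 : 'a'.val.toNat = 97 := by decide
  have e4 : 'z'.val.toNat = 122 := by decide
  have e5 : '0'.val.toNat = 48 := by decide
  have e6 : '9'.val.toNat = 57 := by decide
  rw [e1, e2, e3, e4, e5, e6] at h
  unfold Char.toNat
  omega

theorem pvAlnum_ne_underscore (c : Char) (h : PySem.Chars.isalnum c = true) : c ≠ '_' := by
  intro rfl
  exact absurd h (by decide)

-- A's foldl equals pvEmit
theorem pvLoop_eq (cs : List Char) (res : List Char) (prev : Bool) :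
    (cs.foldl
      (fun (st : List Char × Bool) ch =>
        if PySem.Chars.isalnum ch then (st.1 ++ [ch], false)
        else if st.2 = false then (st.1 ++ ['_'], true) else st)
      (res, prev)).1 = res ++ pvEmit cs prev := by
  induction cs generalizing res prev with
  | nil => simp [pvEmit]
  | cons c r ih =>
    by_cases h : PySem.Chars.isalnum c = true
    · simp only [List.foldl_cons, h, if_pos, pvEmit, ih, List.append_assoc, List.singleton_append]
    · cases prev with
      | false => simp [pvEmit, h, ih]
      | true => simp [pvEmit, h, ih]

-- unfolding lemmas for pvWords
theorem pvWords_nil : pvWords [] = [] := by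
  rw [pvWords]; simp

theorem pvWords_cons_neg (c : Char) (r : List Char) (h : PySem.Chars.isalnum c = false) :
    pvWords (c :: r) = pvWords r := by
  conv_lhs => rw [pvWords]
  conv_rhs => rw [pvWords]
  simp [h]

theorem pvWords_cons_pos (c : Char) (r : List Char) (h : PySem.Chars.isalnum c = true) :
    pvWords (c :: r) =
      (c :: r.takeWhile PySem.Chars.isalnum) :: pvWords (r.dropWhile PySem.Chars.isalnum) := by
  conv_lhs => rw [pvWords]
  simp [h]

theorem pvWords_eq_nil_iff (cs : List Char) :
    pvWords cs = [] ↔ cs.any PySem.Chars.isalnum = false := by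
  rw [pvWords]
  by_cases h : List.dropWhile (fun c => !PySem.Chars.isalnum c) cs = []
  · rw [dif_pos h]
    rw [List.dropWhile_eq_nil_iff] at h
    simp only [true_iff, List.any_eq_false]
    intro c hc
    have := h c hc
    simpa using this
  · simp only [dif_neg h, List.any_eq_false]
    constructor
    · intro hcon; exact absurd hcon (List.cons_ne_nil _ _)
    · intro hall
      exfalso
      apply h
      rw [List.dropWhile_eq_nil_iff]
      intro x hx
      simpa using hall x hx

theorem pvWords_mem (cs : List Char) (w : List Char) (hw : w ∈ pvWords cs) :
    w ≠ [] ∧ ∀ c ∈ w, PySem.Chars.isalnum c = true := by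
  revert w hw
  induction cs using pvWords.induct with
  | case1 x t h =>
    intro w hw
    rw [pvWords, dif_pos h] at hw
    exact absurd hw List.not_mem_nil
  | case2 x t h ih =>
    intro w hw
    rw [pvWords, dif_neg h] at hw
    rcases List.mem_cons.mp hw with hw1 | hw2
    · subst hw1
      obtain ⟨a, t', ht'⟩ := List.exists_cons_of_ne_nil h
      have ht2 : List.dropWhile (fun c => !PySem.Chars.isalnum c) x = a :: t' := ht'
      have hp : (!PySem.Chars.isalnum a) = false := pvDropWhile_head _ x t' a ht2
      simp only [Bool.not_eq_false'] at hp
      rw [ht2]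
      constructor
      · simp [List.takeWhile_cons, hp]
      · intro c hc
        exact List.mem_takeWhile_imp hc
    · exact ih _ hw2

-- join facts
theorem pvJoin_ends (ws : List (List Char))
    (h : ∀ w ∈ ws, w ≠ [] ∧ ∀ c ∈ w, PySem.Chars.isalnum c = true) :
    (ws ≠ [] → PySem.Chars.join ['_'] ws ≠ []) ∧
    (∀ c, (PySem.Chars.join ['_'] ws).head? = some c → c ≠ '_') ∧
    (∀ c, (PySem.Chars.join ['_'] ws).getLast? = some c → c ≠ '_') := by
  induction ws with
  | nil => simp [PySem.Chars.join_nil]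
  | cons w ws ih =>
    have hw := h w (List.mem_cons_self ..)
    have ihs := ih (fun v hv => h v (List.mem_cons_of_mem _ hv))
    cases ws with
    | nil =>
      rw [PySem.Chars.join_singleton]
      refine ⟨fun _ => hw.1, fun c hc => ?_, fun c hc => ?_⟩
      · exact pvAlnum_ne_underscore c (hw.2 c (List.mem_of_mem_head? hc))
      · exact pvAlnum_ne_underscore c (hw.2 c (List.mem_of_getLast? hc))
    | cons w' ws' =>
      rw [PySem.Chars.join_cons_cons]
      have hJ' : PySem.Chars.join ['_'] (w' :: ws') ≠ [] := ihs.1 (List.cons_ne_nil _ _)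
      obtain ⟨d, K, hdK⟩ := List.exists_cons_of_ne_nil hJ'
      obtain ⟨a, w0, haw⟩ := List.exists_cons_of_ne_nil hw.1
      refine ⟨fun _ => by simp [haw], ?_, ?_⟩
      · intro c hc
        rw [haw] at hc
        simp only [List.cons_append, List.head?_cons, Option.some.injEq] at hc
        subst hc
        exact pvAlnum_ne_underscore _ (hw.2 _ (by simp [haw]))
      · intro c hc
        obtain ⟨e, he⟩ := Option.isSome_iff_exists.mp
          (List.getLast?_isSome.mpr (List.cons_ne_nil d K))
        rw [List.append_assoc, List.getLast?_append, List.getLast?_append, hdK, he] at hc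
        simp only [Option.some_or, Option.some.injEq] at hc
        subst hc
        exact ihs.2.2 _ (by rw [hdK]; exact he)

-- the strip of "optional underscore ++ J ++ optional underscore" is J
theorem pvStrip_sandwich (J ld tr : List Char)
    (hld : ld = [] ∨ ld = ['_']) (htr : tr = [] ∨ tr = ['_'])
    (hJh : ∀ c, J.head? = some c → c ≠ '_') (hJl : ∀ c, J.getLast? = some c → c ≠ '_') :
    PySem.Chars.stripChars (ld ++ J ++ tr) ['_'] = J := by
  by_cases hJ : J = []
  · subst hJ
    rcases hld with rfl | rfl <;> rcases htr with rfl | rfl <;> decide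
  · obtain ⟨c, J', hc⟩ := List.exists_cons_of_ne_nil hJ
    have hch : c ≠ '_' := hJh c (by rw [hc]; rfl)
    obtain ⟨d, K, hdK⟩ := List.exists_cons_of_ne_nil (by simp [hc] : J.reverse ≠ [])
    have hdl : J.getLast? = some d := by rw [← List.head?_reverse, hdK]; rfl
    have hd : d ≠ '_' := hJl d hdl
    simp only [PySem.Chars.stripChars]
    have hpc : (['_'].contains c) = false := by simpa using hch
    have hpd : (['_'].contains d) = false := by simpa using hd
    have h1 : List.dropWhile (fun x => ['_'].contains x) (ld ++ J ++ tr) = J ++ tr := by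
      rw [List.append_assoc, List.dropWhile_append]
      have hld' : List.dropWhile (fun x => ['_'].contains x) ld = [] := by
        rcases hld with rfl | rfl <;> decide
      rw [hld']
      simp only [List.isEmpty_nil, if_pos]
      rw [hc]
      simp [hch]
    rw [h1]
    have h2 : List.dropWhile (fun x => ['_'].contains x) (J ++ tr).reverse = J.reverse := by
      rw [List.reverse_append, List.dropWhile_append]
      have htr' : List.dropWhile (fun x => ['_'].contains x) tr.reverse = [] := by
        rcases htr with rfl | rfl <;> decide
      rw [htr']
      simp only [List.isEmpty_nil, if_pos]
      rw [hdK]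
      simp [hd]
    rw [h2, List.reverse_reverse]

theorem pvJoin_cons_head (c : Char) (u : List Char) (ws : List (List Char)) :
    PySem.Chars.join ['_'] ((c :: u) :: ws) = c :: PySem.Chars.join ['_'] (u :: ws) := by
  cases ws with
  | nil => rw [PySem.Chars.join_singleton, PySem.Chars.join_singleton]
  | cons w' ws' => rw [PySem.Chars.join_cons_cons, PySem.Chars.join_cons_cons]; simp

theorem pvTrail_nil : pvTrail [] = [] := rfl

theorem pvTrail_cons (c : Char) (r : List Char)
    (h : PySem.Chars.isalnum c = false ∨ r.any PySem.Chars.isalnum = true) :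
    pvTrail (c :: r) = pvTrail r := by
  cases r with
  | nil =>
    rcases h with h | h
    · simp [pvTrail, h]
    · simp at h
  | cons d r' =>
    obtain ⟨e, he⟩ := Option.isSome_iff_exists.mp
      (List.getLast?_isSome.mpr (List.cons_ne_nil d r'))
    simp only [pvTrail, List.getLast?_cons_cons, he]
    rcases h with h | h
    · simp [List.any_cons, h]
    · conv_lhs => rw [List.any_cons]
      rw [h]
      simp

-- the head step of A's machine on an alphanumeric character, stated on the words side
theorem pvLc (c : Char) (r : List Char) (h : PySem.Chars.isalnum c = true) :
    PySem.Chars.join ['_'] (pvWords (c :: r)) ++ pvTrail (c :: r)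
      = c :: (pvLead r ++ PySem.Chars.join ['_'] (pvWords r) ++ pvTrail r) := by
  cases r with
  | nil =>
    rw [pvWords_cons_pos _ _ h]
    simp [pvWords_nil, pvLead, pvTrail, PySem.Chars.join_singleton, h]
  | cons d r' =>
    by_cases hd : PySem.Chars.isalnum d = true
    · have htw : List.takeWhile PySem.Chars.isalnum (d :: r')
          = d :: List.takeWhile PySem.Chars.isalnum r' := by simp [List.takeWhile_cons, hd]
      have hdw : List.dropWhile PySem.Chars.isalnum (d :: r')
          = List.dropWhile PySem.Chars.isalnum r' := by simp [List.dropWhile_cons, hd]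
      rw [pvWords_cons_pos _ _ h, pvWords_cons_pos _ _ hd, htw, hdw]
      rw [pvJoin_cons_head]
      rw [pvTrail_cons c (d :: r') (Or.inr (by simp [hd]))]
      simp [pvLead, hd]
    · have hd' : PySem.Chars.isalnum d = false := by simpa using hd
      have htw : List.takeWhile PySem.Chars.isalnum (d :: r') = [] := by
        simp [List.takeWhile_cons, hd']
      have hdw : List.dropWhile PySem.Chars.isalnum (d :: r') = d :: r' := by
        simp [List.dropWhile_cons, hd']
      rw [pvWords_cons_pos _ _ h, htw, hdw]
      by_cases hws : pvWords (d :: r') = []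
      · have hany : (d :: r').any PySem.Chars.isalnum = false :=
          (pvWords_eq_nil_iff _).mp hws
        obtain ⟨e, he⟩ := Option.isSome_iff_exists.mp
          (List.getLast?_isSome.mpr (List.cons_ne_nil d r'))
        have hne : PySem.Chars.isalnum e = false := by
          rw [List.any_eq_false] at hany
          simpa using hany e (List.mem_of_getLast? he)
        have h1 : pvTrail (c :: d :: r') = ['_'] := by
          simp only [pvTrail, List.getLast?_cons_cons, he, List.any_cons, h, hne]
          simp
        have h2 : pvTrail (d :: r') = [] := by
          simp only [pvTrail, he, hany]
          simp
        rw [hws, h1, h2, PySem.Chars.join_singleton, PySem.Chars.join_nil]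
        simp [pvLead, hd']
      · obtain ⟨w0, ws', hws'⟩ := List.exists_cons_of_ne_nil hws
        have hany : (d :: r').any PySem.Chars.isalnum = true := by
          rcases hb : (d :: r').any PySem.Chars.isalnum with _ | _
          · exact absurd ((pvWords_eq_nil_iff _).mpr hb) hws
          · rfl
        rw [pvTrail_cons c (d :: r') (Or.inr hany), hws', PySem.Chars.join_cons_cons]
        simp [pvLead, hd']

-- pvEmit in terms of pvWords, lead and trail
theorem pvEmit_eq (cs : List Char) :
    pvEmit cs true = PySem.Chars.join ['_'] (pvWords cs) ++ pvTrail cs ∧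
    pvEmit cs false = pvLead cs ++ PySem.Chars.join ['_'] (pvWords cs) ++ pvTrail cs := by
  induction cs with
  | nil => simp [pvEmit, pvWords_nil, pvTrail_nil, pvLead, PySem.Chars.join_nil]
  | cons c r ih =>
    by_cases h : PySem.Chars.isalnum c = true
    · have hstep : pvEmit (c :: r) true = c :: pvEmit r false := by simp [pvEmit, h]
      have hstep' : pvEmit (c :: r) false = c :: pvEmit r false := by simp [pvEmit, h]
      have hrhs := pvLc c r h
      constructor
      · rw [hstep, ih.2, hrhs]
      · rw [hstep', ih.2]
        have hl : pvLead (c :: r) = [] := by simp [pvLead, h]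
        rw [hl, List.nil_append, hrhs]
    · have h' : PySem.Chars.isalnum c = false := by simpa using h
      have htr : pvTrail (c :: r) = pvTrail r := pvTrail_cons c r (Or.inl h')
      have hw : pvWords (c :: r) = pvWords r := pvWords_cons_neg c r h'
      constructor
      · have hstep : pvEmit (c :: r) true = pvEmit r true := by simp [pvEmit, h']
        rw [hstep, ih.1, htr, hw]
      · have hstep : pvEmit (c :: r) false = '_' :: pvEmit r true := by simp [pvEmit, h']
        rw [hstep, ih.1, htr, hw]
        simp [pvLead, h']


-- go over a block of spaces with no word in progress
theorem pvGo_spaces (xs : List Char) (h : ∀ c ∈ xs, PySem.Chars.isspace c = true)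
    (rest : List Char) (acc : List (List Char)) :
    PySem.Chars.split₀.go (xs ++ rest) [] acc = PySem.Chars.split₀.go rest [] acc := by
  induction xs with
  | nil => rfl
  | cons x xs ih =>
    have hx := h x (List.mem_cons_self ..)
    rw [List.cons_append, PySem.Chars.split₀.go]
    simp only [hx, if_pos, List.isEmpty_nil]
    exact ih (fun c hc => h c (List.mem_cons_of_mem _ hc))

-- go over a block of word characters accumulates them (reversed) in cur
theorem pvGo_word (xs : List Char) (h : ∀ c ∈ xs, PySem.Chars.isspace c = false)
    (rest cur : List Char) (acc : List (List Char)) :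
    PySem.Chars.split₀.go (xs ++ rest) cur acc
      = PySem.Chars.split₀.go rest (xs.reverse ++ cur) acc := by
  induction xs generalizing cur with
  | nil => rfl
  | cons x xs ih =>
    have hx := h x (List.mem_cons_self ..)
    rw [List.cons_append, PySem.Chars.split₀.go]
    simp only [hx, Bool.false_eq_true, if_false]
    rw [ih (fun c hc => h c (List.mem_cons_of_mem _ hc)) (x :: cur)]
    simp

-- B's split₀ of the blanked string computes pvWords
theorem pvGo_words (n : Nat) (cs : List Char) (acc : List (List Char)) (hn : cs.length ≤ n) :
    PySem.Chars.split₀.go (cs.map (fun c => if PySem.Chars.isalnum c then c else ' ')) [] acc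
      = acc.reverse ++ pvWords cs := by
  induction n generalizing cs acc with
  | zero =>
    have hcs : cs = [] := List.eq_nil_of_length_eq_zero (Nat.le_zero.mp hn)
    subst hcs
    rw [List.map_nil, PySem.Chars.split₀.go, pvWords_nil]
    simp
  | succ n ih =>
    have hsplit := List.takeWhile_append_dropWhile
      (p := fun c => !PySem.Chars.isalnum c) (l := cs)
    by_cases ht : List.dropWhile (fun c => !PySem.Chars.isalnum c) cs = []
    · -- no word at all
      have hall : ∀ c ∈ cs, (!PySem.Chars.isalnum c) = true := List.dropWhile_eq_nil_iff.mp ht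
      have hmap : ∀ c ∈ cs.map (fun c => if PySem.Chars.isalnum c then c else ' '),
          PySem.Chars.isspace c = true := by
        intro c hc
        obtain ⟨a, ha, rfl⟩ := List.mem_map.mp hc
        have := hall a ha
        simp only [Bool.not_eq_eq_eq_not, Bool.not_true] at this
        simp [this]
        decide
      have := pvGo_spaces _ hmap [] acc
      rw [List.append_nil] at this
      rw [this, pvWords, dif_pos ht, List.append_nil, PySem.Chars.split₀.go]
      simp
    · -- cs = pre ++ a :: t', with a alphanumeric
      obtain ⟨a, t', ht'⟩ := List.exists_cons_of_ne_nil ht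
      have hpa : PySem.Chars.isalnum a = true := by
        have := pvDropWhile_head _ cs t' a ht'
        simpa using this
      -- word = a :: takeWhile p t', remainder r = dropWhile p t'
      have hw : pvWords cs = (a :: List.takeWhile PySem.Chars.isalnum t')
          :: pvWords (List.dropWhile PySem.Chars.isalnum t') := by
        rw [pvWords, dif_neg ht, ht']
        simp [hpa]
      -- the blanked cs splits into spaces ++ word ++ blanked remainder
      have hpre : ∀ c ∈ List.takeWhile (fun c => !PySem.Chars.isalnum c) cs,
          (!PySem.Chars.isalnum c) = true := fun c hc =>
        List.mem_takeWhile_imp (p := fun c => !PySem.Chars.isalnum c) hc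
      have step1 : PySem.Chars.split₀.go
            (cs.map (fun c => if PySem.Chars.isalnum c then c else ' ')) [] acc
          = PySem.Chars.split₀.go
            ((a :: t').map (fun c => if PySem.Chars.isalnum c then c else ' ')) [] acc := by
        conv_lhs => rw [← hsplit]
        rw [List.map_append, ht']
        apply pvGo_spaces
        intro c hc
        obtain ⟨b, hb, rfl⟩ := List.mem_map.mp hc
        have := hpre b hb
        simp only [Bool.not_eq_eq_eq_not, Bool.not_true] at this
        simp [this]
        decide
      -- now consume the word a :: takeWhile p t'
      have hsplit2 := List.takeWhile_append_dropWhile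
        (p := PySem.Chars.isalnum) (l := t')
      have hwordall : ∀ c ∈ a :: List.takeWhile PySem.Chars.isalnum t',
          PySem.Chars.isspace c = false := by
        intro c hc
        rcases List.mem_cons.mp hc with rfl | hc
        · exact pvAlnum_not_space _ hpa
        · exact pvAlnum_not_space _ (List.mem_takeWhile_imp hc)
      have hmapword : (a :: List.takeWhile PySem.Chars.isalnum t').map
            (fun c => if PySem.Chars.isalnum c then c else ' ')
          = a :: List.takeWhile PySem.Chars.isalnum t' := by
        rw [show ((a :: List.takeWhile PySem.Chars.isalnum t').map
            (fun c => if PySem.Chars.isalnum c then c else ' '))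
            = (a :: List.takeWhile PySem.Chars.isalnum t').map id from
          List.map_congr_left (fun c hc => by
            rcases List.mem_cons.mp hc with rfl | hc
            · simp [hpa]
            · simp [List.mem_takeWhile_imp hc])]
        exact List.map_id _
      have hdecomp : (a :: t').map (fun c => if PySem.Chars.isalnum c then c else ' ')
          = (a :: List.takeWhile PySem.Chars.isalnum t')
            ++ (List.dropWhile PySem.Chars.isalnum t').map
                (fun c => if PySem.Chars.isalnum c then c else ' ') := by
        conv_lhs => rw [show a :: t'
            = (a :: List.takeWhile PySem.Chars.isalnum t')
              ++ List.dropWhile PySem.Chars.isalnum t' by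
          rw [List.cons_append, hsplit2]]
        rw [List.map_append, hmapword]
      rw [step1, hdecomp, pvGo_word _ hwordall]
      rw [hw]
      cases hdw : List.dropWhile PySem.Chars.isalnum t' with
      | nil =>
        rw [List.map_nil, List.append_nil, pvWords_nil, PySem.Chars.split₀.go]
        simp
      | cons e dw' =>
        have hpe : PySem.Chars.isalnum e = false := pvDropWhile_head _ t' dw' e hdw
        rw [List.append_nil, List.map_cons, if_neg (by simp [hpe]), PySem.Chars.split₀.go]
        simp only [show PySem.Chars.isspace ' ' = true from by decide, if_pos]
        rw [if_neg (by simp :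
          ¬((a :: List.takeWhile PySem.Chars.isalnum t').reverse.isEmpty = true))]
        rw [List.reverse_reverse]
        have hlen : dw'.length ≤ n := by
          have h1 : (a :: t').length ≤ cs.length := by
            rw [← ht']
            exact List.length_dropWhile_le _ _
          have h2 : (e :: dw').length ≤ t'.length := by
            rw [← hdw]
            exact List.length_dropWhile_le _ _
          simp only [List.length_cons] at h1 h2
          omega
        rw [ih dw' _ hlen]
        rw [pvWords_cons_neg e dw' hpe]
        simp

-- the two pipelines agree on any character list
theorem pvCore (cs : List Char) :
    PySem.Chars.stripChars (pvEmit cs false) ['_'] =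
      PySem.Chars.join ['_']
        (PySem.Chars.split₀ (cs.map (fun c => if PySem.Chars.isalnum c then c else ' '))) := by
  rw [(pvEmit_eq cs).2]
  have hje := pvJoin_ends (pvWords cs) (pvWords_mem cs)
  have hld : pvLead cs = [] ∨ pvLead cs = ['_'] := by
    cases cs with
    | nil => exact Or.inl rfl
    | cons c r =>
      by_cases h : PySem.Chars.isalnum c = true
      · exact Or.inl (by simp [pvLead, h])
      · exact Or.inr (by simp [pvLead, h])
  have htr : pvTrail cs = [] ∨ pvTrail cs = ['_'] := by
    unfold pvTrail
    cases cs.getLast? with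
    | none => exact Or.inl rfl
    | some c =>
      cases hb : (cs.any PySem.Chars.isalnum && !PySem.Chars.isalnum c) with
      | false => exact Or.inl (by simp [hb])
      | true => exact Or.inr (by simp [hb])
  rw [pvStrip_sandwich _ _ _ hld htr hje.2.1 hje.2.2]
  rw [PySem.Chars.split₀, pvGo_words cs.length cs [] le_rfl]
  simp

-- ===== VERDICT (by name: the statement is the Claim_ definition above) =====
theorem to_filename_spec : Claim_equal_to_filename := by
  intro name _
  unfold Spec_to_filename to_filename to_filename_alt
  simp only [pvLoop_eq, List.nil_append]
  rw [pvCore]
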